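-- pv_equiv track=rewrite | github.com/GLec1er/MPD | algo/array/grades_school.py | move_zeros_to_end_pointers
-- ===== SOURCE A (Python) =====
-- def move_zeros_to_end_pointers(n, grades):
--     non_zero_idx = 0
--
--     for i in range(n):
--         if grades[i] != 0:
--             grades[non_zero_idx] = grades[i]
--             non_zero_idx += 1
--
--     for i in range(non_zero_idx, n):
--         grades[i] = 0
--
--     return grades
-- ===== SOURCE B (Python) =====
-- def move_zeros_to_end_pointers(n, grades):
--     non_zeros = [grades[i] for i in range(n) if grades[i] != 0]
--     grades[:n] = non_zeros + [0] * (n - len(non_zeros))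
--     return grades
-- ===== Notes on version B (the rewrite author's own statement) =====
-- stated objective: simpler
-- what changed: Replaces A's two in-place passes with a moving compaction pointer by a single filter comprehension plus one length-preserving slice assignment; Pre_ restricts to the natural domain 0 <= n <= len(grades), since for negative n A's loops are silently empty while slice assignment counts n from the end.
-- outside the precondition, e.g. on move_zeros_to_end_pointers(-1, [1, 2]): A returns [1, 2], B returns [2]
import Mathlib
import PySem

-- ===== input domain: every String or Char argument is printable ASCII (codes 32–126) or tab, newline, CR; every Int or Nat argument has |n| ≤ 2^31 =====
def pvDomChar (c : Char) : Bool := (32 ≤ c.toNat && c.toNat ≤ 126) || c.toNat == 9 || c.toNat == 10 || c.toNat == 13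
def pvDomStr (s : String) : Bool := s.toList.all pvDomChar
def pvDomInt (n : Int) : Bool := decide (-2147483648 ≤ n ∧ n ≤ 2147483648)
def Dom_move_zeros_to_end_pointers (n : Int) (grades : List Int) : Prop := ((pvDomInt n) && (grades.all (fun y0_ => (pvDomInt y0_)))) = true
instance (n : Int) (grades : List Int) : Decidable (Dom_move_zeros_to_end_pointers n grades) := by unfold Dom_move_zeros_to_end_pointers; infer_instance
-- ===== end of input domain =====

-- B replaces A's two in-place passes with a compaction pointer by one filter
-- comprehension plus a single length-preserving slice assignment (objective: simpler).
-- Both A and B mutate `grades` in place in Python; the equivalence proved here is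
-- about the RETURN value (which is the mutated list in both).

-- ===== PORT A =====
-- grades[i] = v : A only ever writes at an index 0 ≤ i < len(grades) on inputs
-- admitted by Pre_, where List.set with i.toNat is exact.
def pvSetA (l : List Int) (i : Int) (v : Int) : List Int := l.set i.toNat v

def move_zeros_to_end_pointers (n : Int) (grades : List Int) : List Int :=
  -- first pass: compaction with moving pointer non_zero_idx
  let st := (PySem.List.pyRange 0 n 1).foldl
    (fun (st : List Int × Int) i =>
      let v := (PySem.List.pyGet? st.1 i).getD 0   -- in range under Pre_
      if v ≠ 0 then (pvSetA st.1 st.2 v, st.2 + 1) else st)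
    (grades, 0)
  -- second pass: zero out the tail positions non_zero_idx .. n-1
  (PySem.List.pyRange st.2 n 1).foldl (fun l i => pvSetA l i 0) st.1

-- ===== PORT B =====
def move_zeros_to_end_pointers_alt (n : Int) (grades : List Int) : List Int :=
  -- non_zeros = [grades[i] for i in range(n) if grades[i] != 0]
  let nonZeros := (PySem.List.pyRange 0 n 1).filterMap
    (fun i => match PySem.List.pyGet? grades i with
      | some v => if v ≠ 0 then some v else none
      | none => none)
  -- grades[:n] = non_zeros + [0] * (n - len(non_zeros)); the assignment keeps the
  -- tail grades[n:], whose start is the Python-clamped slice bound (exact for all n)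
  nonZeros ++ List.replicate (n - (nonZeros.length : Int)).toNat 0
    ++ grades.drop (PySem.List.clampIdx grades.length n)

-- ===== PRECONDITION & SPEC =====
-- A raises IndexError when n > len(grades); Pre_ also excludes the corner
-- -len(grades) < n < 0, where a negative count is read two defensible ways:
-- A's empty loops leave the list unchanged, B's slice assignment counts n from
-- the end — nobody would specify either value for a negative count.
def Pre_move_zeros_to_end_pointers (n : Int) (grades : List Int) : Prop :=
  (0 ≤ n ∨ n + (grades.length : Int) ≤ 0) ∧ n ≤ (grades.length : Int)
instance (n : Int) (grades : List Int) : Decidable (Pre_move_zeros_to_end_pointers n grades) := by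
  unfold Pre_move_zeros_to_end_pointers; infer_instance
def pvWitness_move_zeros_to_end_pointers : Int × List Int := (4, [0, 3, 0, 5])

def Spec_move_zeros_to_end_pointers (n : Int) (grades : List Int) (out : List Int) : Prop :=
  out = move_zeros_to_end_pointers_alt n grades
instance (n : Int) (grades : List Int) (out : List Int) : Decidable (Spec_move_zeros_to_end_pointers n grades out) := by
  unfold Spec_move_zeros_to_end_pointers; infer_instance

-- ===== CLAIM (what is proved, stated in full; the proofs are below) =====
def Claim_equal_move_zeros_to_end_pointers : Prop := ∀ (n : Int) (grades : List Int), Dom_move_zeros_to_end_pointers n grades → Pre_move_zeros_to_end_pointers n grades → Spec_move_zeros_to_end_pointers n grades (move_zeros_to_end_pointers n grades)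

-- ===== LEMMAS AND PROOFS =====

-- the compacted prefix after scanning the first i elements
def pvFront (g : List Int) (i : Nat) : List Int := (g.take i).filter (fun v => v != 0)

lemma pvFront_le (g : List Int) (i : Nat) (h : i ≤ g.length) :
    (pvFront g i).length ≤ i := by
  have := List.length_filter_le (fun v => v != 0) (g.take i)
  simpa [pvFront, List.length_take, Nat.min_eq_left h] using this

lemma pvFront_succ (g : List Int) (i : Nat) (h : i < g.length) :
    pvFront g (i + 1) = pvFront g i ++ (if g[i] != 0 then [g[i]] else []) := by
  have hf : List.filter (fun v => v != 0) [g[i]] = if g[i] != 0 then [g[i]] else [] := by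
    by_cases hz : g[i] = 0 <;> simp [hz]
  unfold pvFront
  rw [← List.take_concat_get (h := h), List.concat_eq_append, List.filter_append, hf]

-- reading index m of the partially compacted list gives the original element
lemma pvRead (g : List Int) (m : Nat) (hm : m < g.length)
    (hc : (pvFront g m).length ≤ m) :
    (pvFront g m ++ g.drop (pvFront g m).length)[m]? = some g[m] := by
  rw [List.getElem?_append_right hc, List.getElem?_drop]
  have : (pvFront g m).length + (m - (pvFront g m).length) = m := by omega
  rw [this, List.getElem?_eq_getElem hm]

-- invariant of A's first loop
lemma pvLoop1 (g : List Int) (m : Nat) (hm : m ≤ g.length) :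
    (PySem.List.pyRange 0 (m : Int) 1).foldl
      (fun (st : List Int × Int) i =>
        let v := (PySem.List.pyGet? st.1 i).getD 0
        if v ≠ 0 then (pvSetA st.1 st.2 v, st.2 + 1) else st)
      (g, 0)
    = (pvFront g m ++ g.drop (pvFront g m).length, ((pvFront g m).length : Int)) := by
  induction m with
  | zero => simp [PySem.List.pyRange_one_eq_nil, pvFront]
  | succ m ih =>
    have hm' : m < g.length := by omega
    have hc : (pvFront g m).length ≤ m := pvFront_le g m (le_of_lt hm')
    have hcast : ((m + 1 : Nat) : Int) = (m : Int) + 1 := by push_cast; ring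
    rw [hcast, PySem.List.pyRange_one_succ_right (by positivity), List.foldl_append,
        ih (le_of_lt hm'), List.foldl_cons, List.foldl_nil]
    simp only [PySem.List.pyGet?_natCast, pvRead g m hm' hc, Option.getD_some]
    by_cases hz : g[m] = 0
    · simp only [hz, ne_eq, not_true_eq_false, if_false]
      rw [pvFront_succ g m hm']
      simp [hz]
    · simp only [ne_eq, hz, not_false_eq_true, if_true, pvSetA]
      have hdrop : g.drop (pvFront g m).length = g[(pvFront g m).length] :: g.drop ((pvFront g m).length + 1) := by
        exact List.drop_eq_getElem_cons (by omega)
      rw [pvFront_succ g m hm', hdrop, Int.toNat_natCast,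
          List.set_append_right _ _ (le_refl _)]
      simp [hz]
      rw [hdrop, List.set_cons_zero]

-- A's second loop fills positions front.length .. front.length+m'-1 with zeros
lemma pvLoop2 (front tail : List Int) (m' : Nat) (h : m' ≤ tail.length) :
    (PySem.List.pyRange (front.length : Int) ((front.length : Int) + (m' : Int)) 1).foldl
      (fun l i => pvSetA l i 0) (front ++ tail)
    = front ++ List.replicate m' 0 ++ tail.drop m' := by
  induction m' generalizing front tail with
  | zero => simp [PySem.List.pyRange_one_eq_nil]
  | succ m' ih =>
    cases tail with
    | nil => simp at h
    | cons t ts =>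
      rw [PySem.List.pyRange_one_cons (by omega), List.foldl_cons]
      have hset : pvSetA (front ++ t :: ts) (front.length : Int) 0 = (front ++ [0]) ++ ts := by
        unfold pvSetA
        rw [Int.toNat_natCast, List.set_append_right _ _ (le_refl _)]
        simp
      rw [hset]
      have hr : ((front.length : Int) + 1) = (((front ++ [0]).length : Nat) : Int) := by
        simp
      have hr2 : (front.length : Int) + ((m' + 1 : Nat) : Int) = ((front ++ [0]).length : Int) + (m' : Int) := by
        simp; ring
      rw [hr2, hr, ih (front ++ [0]) ts (by simpa using h)]
      simp [List.replicate_succ]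

-- B's comprehension computes the compacted prefix
lemma pvAltFront (g : List Int) (m : Nat) (hm : m ≤ g.length) :
    (PySem.List.pyRange 0 (m : Int) 1).filterMap
      (fun i => match PySem.List.pyGet? g i with
        | some v => if v ≠ 0 then some v else none
        | none => none)
    = pvFront g m := by
  induction m with
  | zero => simp [PySem.List.pyRange_one_eq_nil, pvFront]
  | succ m ih =>
    have hm' : m < g.length := by omega
    have hcast : ((m + 1 : Nat) : Int) = (m : Int) + 1 := by push_cast; ring
    rw [hcast, PySem.List.pyRange_one_succ_right (by positivity), List.filterMap_append,
        ih (le_of_lt hm'), List.filterMap_cons, pvFront_succ g m hm']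
    simp only [PySem.List.pyGet?_natCast, List.getElem?_eq_getElem hm']
    by_cases hz : g[m] = 0 <;> simp [hz]

-- ===== VERDICT (by name: the statement is the Claim_ definition above) =====
theorem move_zeros_to_end_pointers_spec : Claim_equal_move_zeros_to_end_pointers := by
  intro n grades _ hpre
  obtain ⟨hn, hlen⟩ := hpre
  unfold Spec_move_zeros_to_end_pointers move_zeros_to_end_pointers move_zeros_to_end_pointers_alt
  rcases hn with hn | hn
  case inr =>
    -- n ≤ -len(grades): both loops of A and B's comprehension are empty and the
    -- slice grades[:n] is empty, so both sides are grades itself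
    by_cases h0 : n = 0
    · subst h0
      have hg : grades = [] := by
        have : (grades.length : Int) ≤ 0 := by omega
        have : grades.length = 0 := by omega
        simpa using this
      subst hg; decide
    · have hneg : n < 0 := by omega
      have h1 : PySem.List.pyRange 0 n 1 = [] := PySem.List.pyRange_one_eq_nil (by omega)
      obtain ⟨k, hk, rfl⟩ : ∃ k : Nat, 0 < k ∧ n = -(k : Int) :=
        ⟨(-n).toNat, by omega, by omega⟩
      have h2 : PySem.List.clampIdx grades.length (-(k : Int)) = grades.length - k :=
        PySem.List.clampIdx_neg_natCast _ _ hk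
      have h3 : grades.length - k = 0 := by omega
      simp [h1, h2, h3, Int.toNat_of_nonpos (le_of_lt hneg)]
  obtain ⟨m, rfl⟩ : ∃ m : Nat, n = (m : Int) := ⟨n.toNat, (Int.toNat_of_nonneg hn).symm⟩
  have hm : m ≤ grades.length := by exact_mod_cast hlen
  have hclamp : PySem.List.clampIdx grades.length ((m : Nat) : Int) = m := by
    rw [PySem.List.clampIdx_natCast]; omega
  rw [pvLoop1 grades m hm, pvAltFront grades m hm, hclamp]
  have hc : (pvFront grades m).length ≤ m := pvFront_le grades m hm
  have hsplit : (m : Int)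
      = ((pvFront grades m).length : Int) + ((m - (pvFront grades m).length : Nat) : Int) := by
    omega
  rw [hsplit, pvLoop2 (pvFront grades m) (grades.drop (pvFront grades m).length)
      (m - (pvFront grades m).length) (by simp [List.length_drop]; omega)]
  simp only [List.drop_drop]
  have e1 : (((pvFront grades m).length : Int) + ((m - (pvFront grades m).length : Nat) : Int)
      - ((pvFront grades m).length : Int)).toNat = m - (pvFront grades m).length := by omega
  have e3 : (pvFront grades m).length + (m - (pvFront grades m).length) = m := by omega
  rw [e1, e3]
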